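-- pv_equiv track=rewrite | github.com/Teja-rachakonda/DSA | 1990-get-biggest-three-rhombus-sums-in-a-grid/get-biggest-three-rhombus-sums-in-a-grid.py | getBiggestThree
-- ===== SOURCE A (Python) =====
-- from typing import List
--
-- def getBiggestThree(grid: List[List[int]]) -> List[int]:
--     m, n = len(grid), len(grid[0])
--
--     # A set automatically handles the "distinct" values requirement
--     distinct_sums = set()
--
--     # Treat every cell (i, j) as the TOP vertex of a rhombus
--     for i in range(m):
--         for j in range(n):
--
--             # Base Case: Area 0 rhombus (just the cell itself)
--             distinct_sums.add(grid[i][j])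
--
--             # Expand the rhombus size (L is the length of the edge)
--             L = 1
--
--             # Keep expanding as long as the bottom, left, and right vertices are in bounds
--             while i + 2 * L < m and j - L >= 0 and j + L < n:
--                 current_sum = 0
--                 r, c = i, j
--
--                 # 1. Walk Down-Right
--                 for _ in range(L):
--                     current_sum += grid[r][c]
--                     r += 1
--                     c += 1
--
--                 # 2. Walk Down-Left
--                 for _ in range(L):
--                     current_sum += grid[r][c]
--                     r += 1
--                     c -= 1
--
--                 # 3. Walk Up-Left
--                 for _ in range(L):
--                     current_sum += grid[r][c]
--                     r -= 1
--                     c -= 1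
--
--                 # 4. Walk Up-Right
--                 for _ in range(L):
--                     current_sum += grid[r][c]
--                     r -= 1
--                     c += 1
--
--                 distinct_sums.add(current_sum)
--                 L += 1  # Try a bigger rhombus
--
--     # Sort the distinct sums in descending order and return up to the top 3
--     return sorted(list(distinct_sums), reverse=True)[:3]
-- ===== SOURCE B (Python) =====
-- from typing import List
--
-- def getBiggestThree(grid: List[List[int]]) -> List[int]:
--     m, n = len(grid), len(grid[0])
--
--     # Diagonal prefix sums: dr[i][j] = sum along the down-right diagonal ending
--     # at (i, j); dl[i][j] = sum along the down-left diagonal ending at (i, j).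
--     dr = []
--     dl = []
--     for i in range(m):
--         dr.append([grid[i][j] + (dr[i - 1][j - 1] if i > 0 and j > 0 else 0)
--                    for j in range(n)])
--         dl.append([grid[i][j] + (dl[i - 1][j + 1] if i > 0 and j + 1 < n else 0)
--                    for j in range(n)])
--
--     sums = set()
--     for i in range(m):
--         for j in range(n):
--             sums.add(grid[i][j])
--             # Largest edge length L with all four vertices in bounds.
--             lm = min((m - i - 1) // 2, j, n - 1 - j)
--             for L in range(1, lm + 1):
--                 b, r, l = i + 2 * L, j + L, j - L
--                 s = ((dr[i + L][r] - dr[i][j])      # upper-right edge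
--                      + (dl[i + L][l] - dl[i][j])    # upper-left edge
--                      + (dr[b][j] - dr[i + L][l])    # lower-left edge
--                      + (dl[b][j] - dl[i + L][r])    # lower-right edge
--                      + grid[i][j] - grid[b][j])     # corner corrections
--                 sums.add(s)
--
--     return sorted(sums, reverse=True)[:3]
-- ===== Notes on version B (the rewrite author's own statement) =====
-- stated objective: faster
-- what changed: B precomputes two diagonal prefix-sum tables (down-right and down-left) once and then evaluates every rhombus border sum with an O(1) formula over a closed-form range of edge lengths, instead of A's four O(L) border walks inside a while-loop per cell.
-- outside the precondition, e.g. on getBiggestThree([]): A raises IndexError, B raises IndexError; on getBiggestThree([[1, 2], [3]]): A raises IndexError, B raises IndexError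
import Mathlib
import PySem

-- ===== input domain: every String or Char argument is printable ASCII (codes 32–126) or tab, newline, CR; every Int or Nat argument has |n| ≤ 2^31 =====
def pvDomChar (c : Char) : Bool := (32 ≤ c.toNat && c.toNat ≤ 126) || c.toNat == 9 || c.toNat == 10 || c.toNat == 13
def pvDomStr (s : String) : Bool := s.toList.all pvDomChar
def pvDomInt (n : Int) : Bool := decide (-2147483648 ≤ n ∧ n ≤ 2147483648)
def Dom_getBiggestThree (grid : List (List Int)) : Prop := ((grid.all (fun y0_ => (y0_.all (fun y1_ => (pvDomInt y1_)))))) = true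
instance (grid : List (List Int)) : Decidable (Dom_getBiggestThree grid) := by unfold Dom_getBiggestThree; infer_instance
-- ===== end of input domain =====

-- B replaces A's four O(L) border walks per rhombus by two diagonal prefix-sum
-- tables built once, so each border sum costs O(1) (objective: faster).
-- Return values only; neither program mutates its argument.

-- ===== PORT A =====
-- grid[r][c]: both programs only index within bounds (guaranteed by Pre_ and
-- the loop bounds), so the defaulted lookup is exact there.
def pvAt (grid : List (List Int)) (i j : Int) : Int :=
  PySem.List.pyGetD (PySem.List.pyGetD grid i []) j 0

-- one 'for _ in range(L)' walk leg of A: state (current_sum, r, c), step (di, dj)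
def pvWalkLeg (grid : List (List Int)) (di dj L : Int) (st : Int × Int × Int) :
    Int × Int × Int :=
  (PySem.List.pyRange 0 L).foldl
    (fun s _ => (s.1 + pvAt grid s.2.1 s.2.2, s.2.1 + di, s.2.2 + dj)) st

-- the four walk legs of A's while-loop body, in A's order
def pvWalkSum (grid : List (List Int)) (i j L : Int) : Int :=
  (pvWalkLeg grid (-1) 1 L
    (pvWalkLeg grid (-1) (-1) L
      (pvWalkLeg grid 1 (-1) L
        (pvWalkLeg grid 1 1 L (0, i, j))))).1

-- A's 'while i + 2*L < m and j - L >= 0 and j + L < n' loop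
def pvWhile (grid : List (List Int)) (m n i j L : Int) (acc : PySem.Set Int) :
    PySem.Set Int :=
  if h : i + 2*L < m ∧ 0 ≤ j - L ∧ j + L < n then
    pvWhile grid m n i j (L+1) (PySem.Set.add acc (pvWalkSum grid i j L))
  else acc
termination_by (m - (i + 2*L)).toNat
decreasing_by omega

def getBiggestThree (grid : List (List Int)) : List Int :=
  let m := PySem.List.len grid
  let n := PySem.List.len (PySem.List.pyGetD grid 0 [])
  let sums : PySem.Set Int :=
    (PySem.List.pyRange 0 m).foldl (fun acc i =>
      (PySem.List.pyRange 0 n).foldl (fun acc j =>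
        pvWhile grid m n i j 1 (PySem.Set.add acc (pvAt grid i j))) acc)
      PySem.Set.empty
  PySem.List.slice (PySem.List.sorted sums (fun x => x) true) none (some 3)

-- ===== PORT B =====
-- B's diagonal prefix-sum tables (dr, dl), built row by row
def pvDiag (grid : List (List Int)) (m n : Int) :
    List (List Int) × List (List Int) :=
  (PySem.List.pyRange 0 m).foldl (fun p i =>
    ( p.1 ++ [(PySem.List.pyRange 0 n).map (fun j =>
        pvAt grid i j + (if 0 < i ∧ 0 < j then pvAt p.1 (i-1) (j-1) else 0))],
      p.2 ++ [(PySem.List.pyRange 0 n).map (fun j =>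
        pvAt grid i j + (if 0 < i ∧ j + 1 < n then pvAt p.2 (i-1) (j+1) else 0))]))
    ([], [])
def getBiggestThree_alt (grid : List (List Int)) : List Int :=
  let m := PySem.List.len grid
  let n := PySem.List.len (PySem.List.pyGetD grid 0 [])
  let dd := pvDiag grid m n
  let sums : PySem.Set Int :=
    (PySem.List.pyRange 0 m).foldl (fun acc i =>
      (PySem.List.pyRange 0 n).foldl (fun acc j =>
        (PySem.List.pyRange 1
            (min (min (PySem.Int.floordiv (m - i - 1) 2) j) (n - 1 - j) + 1)).foldl
          (fun acc2 L =>
            PySem.Set.add acc2 (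
              (pvAt dd.1 (i+L) (j+L) - pvAt dd.1 i j)
              + (pvAt dd.2 (i+L) (j-L) - pvAt dd.2 i j)
              + (pvAt dd.1 (i+2*L) j - pvAt dd.1 (i+L) (j-L))
              + (pvAt dd.2 (i+2*L) j - pvAt dd.2 (i+L) (j+L))
              + pvAt grid i j - pvAt grid (i+2*L) j))
          (PySem.Set.add acc (pvAt grid i j))) acc)
      PySem.Set.empty
  PySem.List.slice (PySem.List.sorted sums (fun x => x) true) none (some 3)

-- ===== PRECONDITION & SPEC =====
-- Pre_ excludes exactly the inputs where the Python A raises IndexError: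
-- the empty grid (grid[0]) and grids having a row shorter than row 0.
def Pre_getBiggestThree (grid : List (List Int)) : Prop :=
  grid ≠ [] ∧ ∀ row ∈ grid, (grid.getD 0 []).length ≤ row.length
instance (grid : List (List Int)) : Decidable (Pre_getBiggestThree grid) := by
  unfold Pre_getBiggestThree; infer_instance
def pvWitness_getBiggestThree : List (List Int) := [[1,2,3],[4,5,6],[7,8,9]]

def Spec_getBiggestThree (grid : List (List Int)) (out : List Int) : Prop :=
  out = getBiggestThree_alt grid
instance (grid : List (List Int)) (out : List Int) :
    Decidable (Spec_getBiggestThree grid out) := by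
  unfold Spec_getBiggestThree; infer_instance

-- ===== CLAIM (what is proved, stated in full; the proofs are below) =====
def Claim_equal_getBiggestThree : Prop :=
  ∀ (grid : List (List Int)), Dom_getBiggestThree grid →
    Pre_getBiggestThree grid → Spec_getBiggestThree grid (getBiggestThree grid)

-- ===== LEMMAS AND PROOFS =====
-- cell lookup with Nat indices, and the mathematical diagonal prefix sums
def gg (grid : List (List Int)) (i j : Nat) : Int := (grid.getD i []).getD j 0

def drF (grid : List (List Int)) : Nat → Nat → Int
  | 0, j => gg grid 0 j
  | i+1, j => gg grid (i+1) j + (if 0 < j then drF grid i (j-1) else 0)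

def dlF (grid : List (List Int)) (n : Nat) : Nat → Nat → Int
  | 0, j => gg grid 0 j
  | i+1, j => gg grid (i+1) j + (if j+1 < n then dlF grid n i (j+1) else 0)

def DRtab (grid : List (List Int)) (m n : Nat) : List (List Int) :=
  (List.range m).map (fun i => (List.range n).map (fun j => drF grid i j))

def DLtab (grid : List (List Int)) (m n : Nat) : List (List Int) :=
  (List.range m).map (fun i => (List.range n).map (fun j => dlF grid n i j))

theorem pvAt_cast (grid : List (List Int)) (i j : Nat) :
    pvAt grid (i : Int) (j : Int) = gg grid i j := by
  simp [pvAt, PySem.List.pyGetD_natCast, gg]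

theorem DR_at (grid : List (List Int)) (m n a b : Nat) (ha : a < m) (hb : b < n) :
    pvAt (DRtab grid m n) (a : Int) (b : Int) = drF grid a b := by
  simp [pvAt, PySem.List.pyGetD_natCast, DRtab, List.getD, ha, hb]

theorem DL_at (grid : List (List Int)) (m n a b : Nat) (ha : a < m) (hb : b < n) :
    pvAt (DLtab grid m n) (a : Int) (b : Int) = dlF grid n a b := by
  simp [pvAt, PySem.List.pyGetD_natCast, DLtab, List.getD, ha, hb]

theorem pvDiag_spec (grid : List (List Int)) (m n : Nat) :
    pvDiag grid (m : Int) (n : Int) = (DRtab grid m n, DLtab grid m n) := by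
  unfold pvDiag
  rw [PySem.List.pyRange_zero_natCast m, List.foldl_map]
  induction m with
  | zero => simp [DRtab, DLtab]
  | succ m ih =>
    rw [List.range_succ, List.foldl_append, ih]
    simp only [List.foldl_cons, List.foldl_nil]
    rw [Prod.mk.injEq]
    constructor
    · show DRtab grid m n ++ [_] = DRtab grid (m+1) n
      have hsplit : DRtab grid (m+1) n
          = DRtab grid m n ++ [(List.range n).map (fun j => drF grid m j)] := by
        rw [DRtab, DRtab, List.range_succ, List.map_append]; simp
      rw [hsplit]
      congr 1
      simp only [List.cons.injEq, and_true]
      rw [PySem.List.pyRange_zero_natCast, List.map_map]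
      apply List.map_congr_left
      intro j hj
      have hjn : j < n := List.mem_range.mp hj
      simp only [Function.comp]
      rw [pvAt_cast]
      cases m with
      | zero => simp [drF]
      | succ i =>
        cases j with
        | zero => simp [drF]
        | succ s =>
          have h1 : ((i:Int)+1) - 1 = (i : Int) := by ring
          have h2 : ((s:Int)+1) - 1 = (s : Int) := by ring
          have hc : ((0:Int) < ((i+1 : Nat) : Int) ∧ (0:Int) < ((s+1 : Nat) : Int)) := by
            push_cast; omega
          rw [if_pos hc]
          push_cast [h1, h2]
          rw [DR_at grid (i+1) n i s (by omega) (by omega)]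
          simp [drF]
    · show DLtab grid m n ++ [_] = DLtab grid (m+1) n
      have hsplit : DLtab grid (m+1) n
          = DLtab grid m n ++ [(List.range n).map (fun j => dlF grid n m j)] := by
        rw [DLtab, DLtab, List.range_succ, List.map_append]; simp
      rw [hsplit]
      congr 1
      simp only [List.cons.injEq, and_true]
      rw [PySem.List.pyRange_zero_natCast, List.map_map]
      apply List.map_congr_left
      intro j hj
      have hjn : j < n := List.mem_range.mp hj
      simp only [Function.comp]
      rw [pvAt_cast]
      cases m with
      | zero =>
        simp only [Nat.cast_zero]
        rw [if_neg (fun h => absurd h.1 (lt_irrefl 0))]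
        simp [dlF]
      | succ i =>
        by_cases hn : j + 1 < n
        · have hc : ((0:Int) < ((i+1 : Nat) : Int) ∧ ((j:Int)) + 1 < (n:Int)) := by
            push_cast; omega
          rw [if_pos hc]
          rw [show (((i+1:Nat):Int)-1) = (i:Int) by push_cast; ring]
          rw [show ((j:Int)+1) = ((j+1 : Nat):Int) by push_cast; ring]
          rw [DL_at grid (i+1) n i (j+1) (by omega) (by omega)]
          simp [dlF, hn]
        · rw [if_neg (fun h => hn (by exact_mod_cast h.2))]
          simp [dlF, hn]

theorem pvWalkLeg_eq (grid : List (List Int)) (di dj : Int) (ℓ : Nat) (s r c : Int) :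
    pvWalkLeg grid di dj (ℓ : Int) (s, r, c)
      = (s + ∑ t ∈ Finset.range ℓ, pvAt grid (r + di*(t:Int)) (c + dj*(t:Int)),
         r + di*(ℓ:Int), c + dj*(ℓ:Int)) := by
  induction ℓ with
  | zero =>
    simp [pvWalkLeg, PySem.List.pyRange_one_eq_nil (le_refl (0:Int))]
  | succ ℓ ih =>
    unfold pvWalkLeg at *
    rw [show ((ℓ+1 : Nat) : Int) = (ℓ:Int) + 1 by push_cast; ring]
    rw [PySem.List.pyRange_one_succ_right (Int.natCast_nonneg ℓ), List.foldl_append, ih]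
    simp only [List.foldl_cons, List.foldl_nil, Finset.sum_range_succ]
    simp only [Prod.mk.injEq]
    refine ⟨by ring, by ring, by ring⟩

theorem walk_closed (grid : List (List Int)) (i j ℓ : Nat) (hj : ℓ ≤ j) :
    pvWalkSum grid (i : Int) (j : Int) (ℓ : Int) =
      ∑ t ∈ Finset.range ℓ, gg grid (i+t) (j+t)
    + ∑ t ∈ Finset.range ℓ, gg grid (i+ℓ+t) (j+ℓ-t)
    + ∑ t ∈ Finset.range ℓ, gg grid (i+2*ℓ-t) (j-t)
    + ∑ t ∈ Finset.range ℓ, gg grid (i+ℓ-t) (j-ℓ+t) := by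
  unfold pvWalkSum
  rw [pvWalkLeg_eq, pvWalkLeg_eq, pvWalkLeg_eq, pvWalkLeg_eq]
  simp only
  have e1 : ∀ t ∈ Finset.range ℓ,
      pvAt grid ((i:Int) + 1*(t:Int)) ((j:Int) + 1*(t:Int)) = gg grid (i+t) (j+t) := by
    intro t ht
    rw [show ((i:Int) + 1*(t:Int)) = ((i+t : Nat) : Int) by push_cast; ring,
        show ((j:Int) + 1*(t:Int)) = ((j+t : Nat) : Int) by push_cast; ring, pvAt_cast]
  have e2 : ∀ t ∈ Finset.range ℓ,
      pvAt grid ((i:Int) + 1*(ℓ:Int) + 1*(t:Int)) ((j:Int) + 1*(ℓ:Int) + (-1)*(t:Int))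
        = gg grid (i+ℓ+t) (j+ℓ-t) := by
    intro t ht
    have htl : t < ℓ := Finset.mem_range.mp ht
    rw [show ((i:Int) + 1*(ℓ:Int) + 1*(t:Int)) = ((i+ℓ+t : Nat) : Int) by push_cast; ring,
        show ((j:Int) + 1*(ℓ:Int) + (-1)*(t:Int)) = ((j+ℓ-t : Nat) : Int) by push_cast [show t ≤ j+ℓ by omega]; ring,
        pvAt_cast]
  have e3 : ∀ t ∈ Finset.range ℓ,
      pvAt grid ((i:Int) + 1*(ℓ:Int) + 1*(ℓ:Int) + (-1)*(t:Int)) ((j:Int) + 1*(ℓ:Int) + (-1)*(ℓ:Int) + (-1)*(t:Int))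
        = gg grid (i+2*ℓ-t) (j-t) := by
    intro t ht
    have htl : t < ℓ := Finset.mem_range.mp ht
    rw [show ((i:Int) + 1*(ℓ:Int) + 1*(ℓ:Int) + (-1)*(t:Int)) = ((i+2*ℓ-t : Nat) : Int) by
          push_cast [show t ≤ i+2*ℓ by omega]; ring,
        show ((j:Int) + 1*(ℓ:Int) + (-1)*(ℓ:Int) + (-1)*(t:Int)) = ((j-t : Nat) : Int) by
          push_cast [show t ≤ j by omega]; ring,
        pvAt_cast]
  have e4 : ∀ t ∈ Finset.range ℓ,
      pvAt grid ((i:Int) + 1*(ℓ:Int) + 1*(ℓ:Int) + (-1)*(ℓ:Int) + (-1)*(t:Int))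
               ((j:Int) + 1*(ℓ:Int) + (-1)*(ℓ:Int) + (-1)*(ℓ:Int) + 1*(t:Int))
        = gg grid (i+ℓ-t) (j-ℓ+t) := by
    intro t ht
    have htl : t < ℓ := Finset.mem_range.mp ht
    rw [show ((i:Int) + 1*(ℓ:Int) + 1*(ℓ:Int) + (-1)*(ℓ:Int) + (-1)*(t:Int)) = ((i+ℓ-t : Nat) : Int) by
          push_cast [show t ≤ i+ℓ by omega]; ring,
        show ((j:Int) + 1*(ℓ:Int) + (-1)*(ℓ:Int) + (-1)*(ℓ:Int) + 1*(t:Int)) = ((j-ℓ+t : Nat) : Int) by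
          push_cast [hj]; ring,
        pvAt_cast]
  rw [Finset.sum_congr rfl e1, Finset.sum_congr rfl e2, Finset.sum_congr rfl e3,
      Finset.sum_congr rfl e4]
  ring

theorem dr_tele (grid : List (List Int)) (ℓ i j : Nat) :
    drF grid (i+ℓ) (j+ℓ)
      = drF grid i j + ∑ t ∈ Finset.range ℓ, gg grid (i+1+t) (j+1+t) := by
  induction ℓ with
  | zero => simp
  | succ ℓ ih =>
    have : drF grid (i+(ℓ+1)) (j+(ℓ+1)) = gg grid (i+ℓ+1) (j+ℓ+1) + drF grid (i+ℓ) (j+ℓ) := by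
      show drF grid ((i+ℓ)+1) (j+ℓ+1) = _
      rw [drF]
      simp
    rw [this, ih, Finset.sum_range_succ]
    have h1 : i+1+ℓ = i+ℓ+1 := by omega
    have h2 : j+1+ℓ = j+ℓ+1 := by omega
    rw [h1, h2]; abel

theorem dl_tele (grid : List (List Int)) (n : Nat) (ℓ : Nat) :
    ∀ i j : Nat, j + ℓ < n →
    dlF grid n (i+ℓ) j
      = dlF grid n i (j+ℓ) + ∑ t ∈ Finset.range ℓ, gg grid (i+ℓ-t) (j+t) := by
  induction ℓ with
  | zero => simp
  | succ ℓ ih =>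
    intro i j h
    have step : dlF grid n (i+(ℓ+1)) j = gg grid (i+ℓ+1) j + dlF grid n (i+ℓ) (j+1) := by
      show dlF grid n ((i+ℓ)+1) j = _
      rw [dlF, if_pos (by omega)]
    rw [step, ih i (j+1) (by omega), Finset.sum_range_succ']
    have e : ∀ t ∈ Finset.range ℓ, gg grid (i+(ℓ+1)-(t+1)) (j+(t+1)) = gg grid (i+ℓ-t) (j+1+t) := by
      intro t ht
      have : i+(ℓ+1)-(t+1) = i+ℓ-t := by omega
      rw [this, show j+(t+1) = j+1+t by omega]
    rw [Finset.sum_congr rfl e, show i+(ℓ+1)-0 = i+ℓ+1 by omega, show j+1+ℓ = j+(ℓ+1) by omega]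
    ring

theorem border_eq (grid : List (List Int)) (n i j ℓ : Nat)
    (hℓ : 1 ≤ ℓ) (hj : ℓ ≤ j) (hn : j + ℓ < n) :
    pvWalkSum grid (i : Int) (j : Int) (ℓ : Int) =
      (drF grid (i+ℓ) (j+ℓ) - drF grid i j)
    + (dlF grid n (i+ℓ) (j-ℓ) - dlF grid n i j)
    + (drF grid (i+2*ℓ) j - drF grid (i+ℓ) (j-ℓ))
    + (dlF grid n (i+2*ℓ) j - dlF grid n (i+ℓ) (j+ℓ))
    + gg grid i j - gg grid (i+2*ℓ) j := by
  obtain ⟨k, rfl⟩ : ∃ k, ℓ = k+1 := ⟨ℓ-1, by omega⟩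
  rw [walk_closed grid i j (k+1) hj]
  -- rewrite the four table differences as edge sums
  have R1 : drF grid (i+(k+1)) (j+(k+1))
      = drF grid i j + ∑ t ∈ Finset.range (k+1), gg grid (i+1+t) (j+1+t) :=
    dr_tele grid (k+1) i j
  have R2 : dlF grid n (i+(k+1)) (j-(k+1))
      = dlF grid n i j + ∑ t ∈ Finset.range (k+1), gg grid (i+(k+1)-t) ((j-(k+1))+t) := by
    have := dl_tele grid n (k+1) i (j-(k+1)) (by omega)
    rwa [show (j-(k+1))+(k+1) = j by omega] at this
  have R3 : drF grid (i+2*(k+1)) j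
      = drF grid (i+(k+1)) (j-(k+1))
        + ∑ t ∈ Finset.range (k+1), gg grid (i+(k+1)+1+t) ((j-(k+1))+1+t) := by
    have := dr_tele grid (k+1) (i+(k+1)) (j-(k+1))
    rwa [show (i+(k+1))+(k+1) = i+2*(k+1) by omega,
         show (j-(k+1))+(k+1) = j by omega] at this
  have R4 : dlF grid n (i+2*(k+1)) j
      = dlF grid n (i+(k+1)) (j+(k+1))
        + ∑ t ∈ Finset.range (k+1), gg grid (i+2*(k+1)-t) (j+t) := by
    have := dl_tele grid n (k+1) (i+(k+1)) j hn
    rwa [show (i+(k+1))+(k+1) = i+2*(k+1) by omega] at this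
  rw [R1, R2, R3, R4]
  -- edge-sum identities
  have ha : ∑ t ∈ Finset.range (k+1), gg grid (i+t) (j+t)
      = ∑ t ∈ Finset.range (k+1), gg grid (i+1+t) (j+1+t)
        + gg grid i j - gg grid (i+(k+1)) (j+(k+1)) := by
    rw [Finset.sum_range_succ' (fun t => gg grid (i+t) (j+t)) k,
        Finset.sum_range_succ (fun t => gg grid (i+1+t) (j+1+t)) k,
        Finset.sum_congr rfl (fun t ht => by
          rw [show i+(t+1) = i+1+t by omega, show j+(t+1) = j+1+t by omega])]
    rw [show i+1+k = i+(k+1) by omega, show j+1+k = j+(k+1) by omega]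
    abel
  have hb : ∑ t ∈ Finset.range (k+1), gg grid (i+(k+1)+t) (j+(k+1)-t)
      = ∑ t ∈ Finset.range (k+1), gg grid (i+2*(k+1)-t) (j+t)
        + gg grid (i+(k+1)) (j+(k+1)) - gg grid (i+2*(k+1)) j := by
    have hE1 : ∑ t ∈ Finset.range (k+1+1), gg grid (i+(k+1)+t) (j+(k+1)-t)
        = ∑ t ∈ Finset.range (k+1), gg grid (i+(k+1)+t) (j+(k+1)-t)
          + gg grid (i+2*(k+1)) j := by
      rw [Finset.sum_range_succ]
      rw [show i+(k+1)+(k+1) = i+2*(k+1) by omega, show j+(k+1)-(k+1) = j by omega]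
    have hE2 : ∑ t ∈ Finset.range (k+1+1), gg grid (i+(k+1)+t) (j+(k+1)-t)
        = ∑ t ∈ Finset.range (k+1), gg grid (i+2*(k+1)-t) (j+t)
          + gg grid (i+(k+1)) (j+(k+1)) := by
      rw [← Finset.sum_range_reflect (fun t => gg grid (i+(k+1)+t) (j+(k+1)-t)) (k+1+1)]
      rw [Finset.sum_congr rfl (fun t ht => by
            have htk := Finset.mem_range.mp ht
            rw [show i+(k+1)+(k+1+1-1-t) = i+2*(k+1)-t by omega,
                show j+(k+1)-(k+1+1-1-t) = j+t by omega])]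
      rw [Finset.sum_range_succ]
      rw [show i+2*(k+1)-(k+1) = i+(k+1) by omega]
    omega
  have hc : ∑ t ∈ Finset.range (k+1), gg grid (i+2*(k+1)-t) (j-t)
      = ∑ t ∈ Finset.range (k+1), gg grid (i+(k+1)+1+t) ((j-(k+1))+1+t) := by
    rw [← Finset.sum_range_reflect (fun t => gg grid (i+(k+1)+1+t) ((j-(k+1))+1+t)) (k+1)]
    exact Finset.sum_congr rfl (fun t ht => by
      have htk := Finset.mem_range.mp ht
      rw [show i+(k+1)+1+(k+1-1-t) = i+2*(k+1)-t by omega,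
          show (j-(k+1))+1+(k+1-1-t) = j-t by omega])
  rw [ha, hb, hc]
  ring

def pvLm (m n i j : Int) : Int :=
  min (min (PySem.Int.floordiv (m-i-1) 2) j) (n-1-j)

theorem pvCond_iff (m n i j L : Int) :
    (i + 2*L < m ∧ 0 ≤ j - L ∧ j + L < n) ↔ L ≤ pvLm m n i j := by
  unfold pvLm
  rw [le_min_iff, le_min_iff, PySem.Int.le_floordiv_iff_mul_le (by norm_num)]
  omega

theorem pvWhile_fold (grid : List (List Int)) (m n i j : Int) :
    ∀ (k : Nat) (L : Int) (acc : PySem.Set Int),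
      (pvLm m n i j + 1 - L).toNat ≤ k →
      pvWhile grid m n i j L acc
        = (PySem.List.pyRange L (pvLm m n i j + 1)).foldl
            (fun a l => PySem.Set.add a (pvWalkSum grid i j l)) acc := by
  intro k
  induction k with
  | zero =>
    intro L acc hk
    rw [pvWhile, dif_neg (fun h => by have := (pvCond_iff m n i j L).mp h; omega)]
    rw [PySem.List.pyRange_one_eq_nil (by omega)]
    rfl
  | succ k ih =>
    intro L acc hk
    rw [pvWhile]
    by_cases h : i + 2*L < m ∧ 0 ≤ j - L ∧ j + L < n
    · have hL : L ≤ pvLm m n i j := (pvCond_iff m n i j L).mp h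
      rw [dif_pos h, PySem.List.pyRange_one_cons (by omega), List.foldl_cons]
      exact ih (L+1) _ (by omega)
    · have hL : ¬ L ≤ pvLm m n i j := fun hc => h ((pvCond_iff m n i j L).mpr hc)
      rw [dif_neg h, PySem.List.pyRange_one_eq_nil (by omega)]
      rfl

theorem ports_eq (grid : List (List Int)) :
    getBiggestThree grid = getBiggestThree_alt grid := by
  unfold getBiggestThree getBiggestThree_alt
  simp only [PySem.List.len_eq, PySem.List.pyGetD_zero]
  rw [pvDiag_spec grid grid.length ((grid.getD 0 []).length)]
  congr 1
  congr 1
  apply PySem.List.foldl_congr_mem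
  intro acc iI hiI
  obtain ⟨hi0, him⟩ := PySem.List.mem_pyRange_one.mp hiI
  obtain ⟨iN, rfl⟩ : ∃ iN : Nat, iI = (iN : Int) := ⟨iI.toNat, by omega⟩
  have hiN : iN < grid.length := by exact_mod_cast him
  apply PySem.List.foldl_congr_mem
  intro acc2 jI hjI
  obtain ⟨hj0, hjn⟩ := PySem.List.mem_pyRange_one.mp hjI
  obtain ⟨jN, rfl⟩ : ∃ jN : Nat, jI = (jN : Int) := ⟨jI.toNat, by omega⟩
  have hjN : jN < (grid.getD 0 []).length := by exact_mod_cast hjn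
  rw [pvWhile_fold grid _ _ _ _
        ((pvLm (grid.length : Int) ((grid.getD 0 []).length : Int) (iN : Int) (jN : Int) + 1 - 1).toNat)
        1 _ (le_refl _)]
  apply PySem.List.foldl_congr_mem
  intro a l hl
  obtain ⟨hl1, hl2⟩ := PySem.List.mem_pyRange_one.mp hl
  have hlm : l ≤ pvLm (grid.length : Int) ((grid.getD 0 []).length : Int) (iN : Int) (jN : Int) := by omega
  have hbnd := (pvCond_iff (grid.length : Int) ((grid.getD 0 []).length : Int) (iN : Int) (jN : Int) l).mpr hlm
  obtain ⟨ℓ, rfl⟩ : ∃ ℓ : Nat, l = (ℓ : Int) := ⟨l.toNat, by omega⟩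
  have h1 : 1 ≤ ℓ := by exact_mod_cast hl1
  have hm : iN + 2*ℓ < grid.length := by
    have := hbnd.1; push_cast at this ⊢; omega
  have hjℓ : ℓ ≤ jN := by
    have := hbnd.2.1; omega
  have hnℓ : jN + ℓ < (grid.getD 0 []).length := by
    have := hbnd.2.2; push_cast at this ⊢; omega
  congr 1
  -- rewrite B's table lookups to drF/dlF and conclude with border_eq
  rw [show ((iN:Int) + (ℓ:Int)) = ((iN+ℓ : Nat) : Int) by push_cast; ring,
      show ((jN:Int) + (ℓ:Int)) = ((jN+ℓ : Nat) : Int) by push_cast; ring,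
      show ((jN:Int) - (ℓ:Int)) = ((jN-ℓ : Nat) : Int) by push_cast [hjℓ]; ring,
      show ((iN:Int) + 2*(ℓ:Int)) = ((iN+2*ℓ : Nat) : Int) by push_cast; ring]
  rw [DR_at grid _ _ _ _ (by omega) (by omega),
      DR_at grid _ _ _ _ (by omega) (by omega),
      DR_at grid _ _ _ _ (by omega) (by omega),
      DR_at grid _ _ _ _ (by omega) (by omega),
      DL_at grid _ _ _ _ (by omega) (by omega),
      DL_at grid _ _ _ _ (by omega) (by omega),
      DL_at grid _ _ _ _ (by omega) (by omega),
      DL_at grid _ _ _ _ (by omega) (by omega),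
      pvAt_cast, pvAt_cast]
  rw [border_eq grid ((grid.getD 0 []).length) iN jN ℓ h1 hjℓ hnℓ]

-- ===== VERDICT (by name: the statement is the Claim_ definition above) =====
theorem getBiggestThree_spec : Claim_equal_getBiggestThree := by
  intro grid _ _
  unfold Spec_getBiggestThree
  exact ports_eq grid
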